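-- pv_equiv track=rewrite | github.com/kooooozh/MathStatistic | files/lab2.py | check_value
-- ===== SOURCE A (Python) =====
-- def check_value(cumul, y):
--     X = []
--     for item in y:
--         tmp = 0
--         for prob in cumul:
--             if item < prob:
--                 X.append(tmp)
--                 break
--             tmp += 1
--     return X
-- ===== SOURCE B (Python) =====
-- def check_value(cumul, y):
--     # Prefix maxima of cumul are nondecreasing, and the first index where
--     # cumul exceeds item equals the first index where the prefix maximum does,
--     # so each item is answered by one binary search.
--     prefix = []
--     cur = None
--     for p in cumul:
--         cur = p if cur is None or p > cur else cur
--         prefix.append(cur)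
--     n = len(prefix)
--     X = []
--     for item in y:
--         lo, hi = 0, n
--         while lo < hi:
--             mid = (lo + hi) // 2
--             if prefix[mid] <= item:
--                 lo = mid + 1
--             else:
--                 hi = mid
--         if lo < n:
--             X.append(lo)
--     return X
-- ===== Notes on version B (the rewrite author's own statement) =====
-- stated objective: faster
-- what changed: Replaces the per-item linear scan of cumul with a one-time prefix-maxima pass followed by a binary search per item (first index where the prefix maximum exceeds the item equals the first index where cumul does).
import Mathlib
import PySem

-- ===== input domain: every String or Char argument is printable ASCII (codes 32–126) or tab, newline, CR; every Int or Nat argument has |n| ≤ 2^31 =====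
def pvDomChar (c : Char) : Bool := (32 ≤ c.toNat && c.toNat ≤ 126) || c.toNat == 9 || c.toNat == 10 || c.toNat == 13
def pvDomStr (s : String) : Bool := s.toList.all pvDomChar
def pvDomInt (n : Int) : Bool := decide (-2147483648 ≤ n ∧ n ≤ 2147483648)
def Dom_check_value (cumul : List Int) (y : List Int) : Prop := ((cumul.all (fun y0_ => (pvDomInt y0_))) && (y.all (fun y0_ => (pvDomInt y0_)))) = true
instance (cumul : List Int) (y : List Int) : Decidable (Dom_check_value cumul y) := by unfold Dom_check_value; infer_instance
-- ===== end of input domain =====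

-- B replaces A's per-item linear scan of cumul by a one-time prefix-maxima pass
-- plus one binary search per item (objective: faster).

-- ===== PORT A =====
-- inner 'for prob in cumul' loop: returns the counter at the first prob with item < prob (break), none if the loop ends
def firstIdxA (item : Int) : List Int → Int → Option Int
  | [], _ => none
  | p :: rest, tmp => if item < p then some tmp else firstIdxA item rest (tmp + 1)

def check_value (cumul : List Int) (y : List Int) : List Int :=
  y.foldl (fun X item =>
    match firstIdxA item cumul 0 with
    | some t => X ++ [t]
    | none => X) []

-- ===== PORT B =====
-- running prefix maxima ('cur = p if cur is None or p > cur else cur'); head handled by prefixMax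
def pmAux (cur : Int) : List Int → List Int
  | [] => []
  | p :: r => let c := if p > cur then p else cur; c :: pmAux c r

def prefixMax : List Int → List Int
  | [] => []
  | p :: r => p :: pmAux p r

-- the 'while lo < hi' binary-search loop; prefix[mid] ported as getD (mid < hi ≤ length, always in range)
def bsr (M : List Int) (item : Int) (lo hi : Nat) : Nat :=
  if _h : lo < hi then
    let mid := (lo + hi) / 2
    if M.getD mid 0 ≤ item then bsr M item (mid + 1) hi else bsr M item lo mid
  else lo
termination_by hi - lo
decreasing_by all_goals omega

def check_value_alt (cumul : List Int) (y : List Int) : List Int :=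
  let M := prefixMax cumul
  let n := M.length
  y.foldl (fun X item =>
    let lo := bsr M item 0 n
    if lo < n then X ++ [(lo : Int)] else X) []

-- ===== PRECONDITION & SPEC =====
def Spec_check_value (cumul : List Int) (y : List Int) (out : List Int) : Prop := out = check_value_alt cumul y
instance (cumul : List Int) (y : List Int) (out : List Int) : Decidable (Spec_check_value cumul y out) := by unfold Spec_check_value; infer_instance

-- ===== CLAIM (what is proved, stated in full; the proofs are below) =====
def Claim_equal_check_value : Prop := ∀ (cumul : List Int) (y : List Int), Dom_check_value cumul y → Spec_check_value cumul y (check_value cumul y)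

-- ===== LEMMAS AND PROOFS =====

-- A's inner loop in closed form: the takeWhile length of elements ≤ item
theorem firstIdxA_eq (item : Int) : ∀ (l : List Int) (t : Int),
    firstIdxA item l t =
      (if (l.takeWhile (fun x => decide (x ≤ item))).length < l.length
       then some (t + (l.takeWhile (fun x => decide (x ≤ item))).length)
       else none) := by
  intro l
  induction l with
  | nil => intro t; simp [firstIdxA]
  | cons p r ih =>
    intro t
    by_cases h : item < p
    · have hp : ¬ p ≤ item := by omega
      simp [firstIdxA, List.takeWhile, h, hp]
    · have hp : p ≤ item := by omega
      simp only [firstIdxA, if_neg h, List.takeWhile, hp, decide_true, List.length_cons, ih]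
      by_cases hk : (r.takeWhile (fun x => decide (x ≤ item))).length < r.length
      · rw [if_pos hk, if_pos (by omega)]
        congr 1
        push_cast
        ring
      · rw [if_neg hk, if_neg (by omega)]

theorem pmAux_length (cur : Int) : ∀ l : List Int, (pmAux cur l).length = l.length := by
  intro l
  induction l generalizing cur with
  | nil => simp [pmAux]
  | cons p r ih => simp [pmAux, ih]

theorem prefixMax_length (l : List Int) : (prefixMax l).length = l.length := by
  cases l with
  | nil => rfl
  | cons p r => simp [prefixMax, pmAux_length]

theorem pmAux_le (cur : Int) : ∀ l : List Int, ∀ x ∈ pmAux cur l, cur ≤ x := by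
  intro l
  induction l generalizing cur with
  | nil => simp [pmAux]
  | cons p r ih =>
    intro x hx
    simp only [pmAux, List.mem_cons] at hx
    rcases hx with rfl | hx
    · split <;> omega
    · have := ih (if p > cur then p else cur) x hx
      split at this <;> omega

theorem pmAux_pairwise (cur : Int) : ∀ l : List Int, List.Pairwise (· ≤ ·) (cur :: pmAux cur l) := by
  intro l
  induction l generalizing cur with
  | nil => simp [pmAux]
  | cons p r ih =>
    have ihc := ih (if p > cur then p else cur)
    simp only [pmAux]
    constructor
    · intro x hx
      simp only [List.mem_cons] at hx
      rcases hx with rfl | hx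
      · split <;> omega
      · have := pmAux_le (if p > cur then p else cur) r x hx
        split at this <;> omega
    · exact ihc

theorem prefixMax_pairwise (l : List Int) : List.Pairwise (· ≤ ·) (prefixMax l) := by
  cases l with
  | nil => simp [prefixMax]
  | cons p r => exact pmAux_pairwise p r

-- the takeWhile length is the same on the prefix-maxima list (inner version)
theorem tw_pmAux (item : Int) : ∀ (l : List Int) (cur : Int), cur ≤ item →
    ((pmAux cur l).takeWhile (fun x => decide (x ≤ item))).length
      = (l.takeWhile (fun x => decide (x ≤ item))).length := by
  intro l
  induction l with
  | nil => intro cur _; simp [pmAux]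
  | cons p r ih =>
    intro cur hcur
    simp only [pmAux]
    by_cases hp : p ≤ item
    · have hc : (if p > cur then p else cur) ≤ item := by split <;> omega
      simp only [List.takeWhile, hc, hp, decide_true, List.length_cons, ih _ hc]
    · have hc : ¬ (if p > cur then p else cur) ≤ item := by split <;> omega
      simp [List.takeWhile, hc, hp]

theorem tw_prefixMax (item : Int) (l : List Int) :
    ((prefixMax l).takeWhile (fun x => decide (x ≤ item))).length
      = (l.takeWhile (fun x => decide (x ≤ item))).length := by
  cases l with
  | nil => rfl
  | cons p r =>
    by_cases hp : p ≤ item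
    · simp only [prefixMax, List.takeWhile, hp, decide_true, List.length_cons, tw_pmAux item r p hp]
    · simp [prefixMax, List.takeWhile, hp]

theorem tw_length_le {p : Int → Bool} : ∀ l : List Int, (l.takeWhile p).length ≤ l.length := by
  intro l
  induction l with
  | nil => simp
  | cons a r ih =>
    by_cases h : p a
    · simp [List.takeWhile, h]; omega
    · simp [List.takeWhile, h]

theorem tw_getD {p : Int → Bool} : ∀ (l : List Int) (i : Nat),
    i < (l.takeWhile p).length → p (l.getD i 0) = true := by
  intro l
  induction l with
  | nil => simp
  | cons a r ih =>
    intro i hi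
    by_cases h : p a
    · simp only [List.takeWhile, h] at hi
      cases i with
      | zero => simpa using h
      | succ j =>
        simp only [List.length_cons] at hi
        simpa using ih j (by omega)
    · simp [List.takeWhile, h] at hi

theorem tw_stop {p : Int → Bool} : ∀ l : List Int,
    (l.takeWhile p).length < l.length → p (l.getD (l.takeWhile p).length 0) = false := by
  intro l
  induction l with
  | nil => simp
  | cons a r ih =>
    intro hlt
    by_cases h : p a
    · simp only [List.takeWhile, h] at hlt ⊢
      simp only [List.length_cons] at hlt ⊢
      simpa using ih (by omega)
    · simp [List.takeWhile, h]

-- getD is monotone along a (· ≤ ·)-pairwise list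
theorem pairwise_getD_mono {M : List Int} (hpw : List.Pairwise (· ≤ ·) M)
    (i j : Nat) (hij : i ≤ j) (hj : j < M.length) : M.getD i 0 ≤ M.getD j 0 := by
  rcases Nat.lt_or_ge i j with h | h
  · have hi : i < M.length := by omega
    rw [List.getD_eq_getElem M 0 hi, List.getD_eq_getElem M 0 hj]
    exact (List.pairwise_iff_getElem.mp hpw) i j hi hj h
  · have : i = j := by omega
    subst this; rfl

-- binary-search correctness under the separation hypothesis
theorem bsr_correct (M : List Int) (item : Int) (k : Nat) :
    ∀ (d lo hi : Nat), hi - lo ≤ d → lo ≤ k → k ≤ hi →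
    (∀ mid, lo ≤ mid → mid < hi → ((M.getD mid 0 ≤ item) ↔ mid < k)) →
    bsr M item lo hi = k := by
  intro d
  induction d with
  | zero =>
    intro lo hi hd hlo hhi _
    have h1 : ¬ lo < hi := by omega
    rw [bsr, dif_neg h1]
    omega
  | succ d ih =>
    intro lo hi hd hlo hhi hsep
    by_cases h : lo < hi
    · rw [bsr, dif_pos h]
      simp only
      set mid := (lo + hi) / 2 with hmid
      have hm1 : lo ≤ mid := by omega
      have hm2 : mid < hi := by omega
      by_cases hle : M.getD mid 0 ≤ item
      · rw [if_pos hle]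
        have hk : mid < k := (hsep mid hm1 hm2).mp hle
        exact ih (mid + 1) hi (by omega) (by omega) hhi
          (fun m hm hm' => hsep m (by omega) hm')
      · rw [if_neg hle]
        have hk : ¬ mid < k := fun hc => hle ((hsep mid hm1 hm2).mpr hc)
        exact ih lo mid (by omega) hlo (by omega)
          (fun m hm hm' => hsep m hm (by omega))
    · rw [bsr, dif_neg h]
      omega

-- the full binary search over the prefix maxima computes the takeWhile length of cumul
theorem bsr_prefixMax (cumul : List Int) (item : Int) :
    bsr (prefixMax cumul) item 0 (prefixMax cumul).length
      = (cumul.takeWhile (fun x => decide (x ≤ item))).length := by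
  set M := prefixMax cumul with hM
  set k := (M.takeWhile (fun x => decide (x ≤ item))).length with hk
  have hkc : k = (cumul.takeWhile (fun x => decide (x ≤ item))).length := tw_prefixMax item cumul
  have hkle : k ≤ M.length := tw_length_le M
  rw [← hkc]
  refine bsr_correct M item k M.length 0 M.length (by omega) (by omega) hkle ?_
  intro mid _ hmid
  constructor
  · intro hle
    by_contra hc
    have hkm : k ≤ mid := by omega
    have hklt : k < M.length := by omega
    have hstop := tw_stop (p := fun x => decide (x ≤ item)) M hklt
    rw [← hk] at hstop
    have hpw : List.Pairwise (· ≤ ·) M := by rw [hM]; exact prefixMax_pairwise cumul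
    have hmono := pairwise_getD_mono hpw k mid hkm hmid
    simp only [decide_eq_false_iff_not] at hstop
    omega
  · intro hlt
    have := tw_getD (p := fun x => decide (x ≤ item)) M mid (by omega)
    simpa using this

theorem step_eq (cumul : List Int) (item : Int) (X : List Int) :
    (match firstIdxA item cumul 0 with
     | some t => X ++ [t]
     | none => X)
      = (let lo := bsr (prefixMax cumul) item 0 (prefixMax cumul).length
         if lo < (prefixMax cumul).length then X ++ [(lo : Int)] else X) := by
  rw [firstIdxA_eq, bsr_prefixMax, prefixMax_length]
  by_cases h : (cumul.takeWhile (fun x => decide (x ≤ item))).length < cumul.length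
  · simp [h]
  · simp [h]

theorem fold_eq (cumul : List Int) : ∀ (y X : List Int),
    y.foldl (fun X item =>
      match firstIdxA item cumul 0 with
      | some t => X ++ [t]
      | none => X) X
      = y.foldl (fun X item =>
          let lo := bsr (prefixMax cumul) item 0 (prefixMax cumul).length
          if lo < (prefixMax cumul).length then X ++ [(lo : Int)] else X) X := by
  intro y
  induction y with
  | nil => intro X; rfl
  | cons a r ih =>
    intro X
    simp only [List.foldl_cons]
    rw [step_eq cumul a]
    exact ih _

-- ===== VERDICT (by name: the statement is the Claim_ definition above) =====
theorem check_value_spec : Claim_equal_check_value := by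
  intro cumul y _
  unfold Spec_check_value check_value check_value_alt
  exact fold_eq cumul y []
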